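-- pv_equiv track=rewrite | github.com/splinestein/splinestein-diffing-algorithm | spdiff.py | perfect_common_match_calc
-- ===== SOURCE A (Python) =====
-- def perfect_common_match_calc(a: str) -> int:
--     """
--     In an ideal scenario, how many common matches would be made?
--     If both strings are "aaabb" it's (equation):
--     (how many a's * how many a's) + unique character (how many b's * how many b's) + ... = 13
--     """
--     counts = {}
--
--     for character in a:
--         if character in counts:
--             counts[character] += 1
--         else:
--             counts[character] = 1
--
--     total_matches = 0
--
--     for count in counts.values():
--         total_matches += count * count
--
--     return total_matches
-- ===== SOURCE B (Python) =====
-- def perfect_common_match_calc(a: str) -> int: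
--     # sort-then-group: each run of equal chars in the sorted list contributes len(run)**2
--     s = sorted(a)
--     total = 0
--     while s:
--         c = s[0]
--         run = 1
--         while run < len(s) and s[run] == c:
--             run += 1
--         total += run * run
--         s = s[run:]
--     return total
-- ===== Notes on version B (the rewrite author's own statement) =====
-- stated objective: alternative
-- what changed: Replaces hash-map frequency accumulation followed by a sum over dict values with sort-then-scan: sort the characters once and add the squared length of each maximal run of equal characters.
import Mathlib
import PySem

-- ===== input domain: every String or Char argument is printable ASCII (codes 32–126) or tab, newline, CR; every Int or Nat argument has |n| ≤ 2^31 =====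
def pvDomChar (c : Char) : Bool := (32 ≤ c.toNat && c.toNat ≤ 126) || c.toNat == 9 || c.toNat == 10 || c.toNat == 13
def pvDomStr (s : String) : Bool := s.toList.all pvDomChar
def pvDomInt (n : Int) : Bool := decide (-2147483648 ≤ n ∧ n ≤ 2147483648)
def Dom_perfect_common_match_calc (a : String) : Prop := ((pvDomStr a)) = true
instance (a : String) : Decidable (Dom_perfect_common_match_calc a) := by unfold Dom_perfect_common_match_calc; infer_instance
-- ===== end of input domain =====

-- B replaces A's dict-based frequency counting with sort-then-grouped-run summation (alternative algorithm, same result).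

-- ===== PORT A =====
def perfect_common_match_calc (a : String) : Int :=
  let counts := a.toList.foldl
    (fun (counts : PySem.Dict Char Int) character =>
      if counts.contains character then
        counts.insert character (counts.getD character 0 + 1)
      else
        counts.insert character 1)
    PySem.Dict.empty
  counts.values.foldl (fun total_matches count => total_matches + count * count) 0

-- ===== PORT B =====
-- the outer 'while s:' loop of Source B: one iteration measures the leading run (the inner while) and slices it off
def pvRunsSum : List Char → Int
  | [] => 0
  | c :: t =>
    let run : Int := 1 + (t.takeWhile (fun x => x == c)).length
    run * run + pvRunsSum (t.dropWhile (fun x => x == c))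
termination_by l => l.length
decreasing_by simpa using Nat.lt_succ_of_le (List.length_dropWhile_le _ t)

def perfect_common_match_calc_alt (a : String) : Int :=
  pvRunsSum (PySem.List.sorted a.toList (fun x => x) false)

-- ===== PRECONDITION & SPEC =====
def Spec_perfect_common_match_calc (a : String) (out : Int) : Prop := out = perfect_common_match_calc_alt a
instance (a : String) (out : Int) : Decidable (Spec_perfect_common_match_calc a out) := by unfold Spec_perfect_common_match_calc; infer_instance

-- ===== CLAIM (what is proved, stated in full; the proofs are below) =====
def Claim_equal_perfect_common_match_calc : Prop := ∀ (a : String), Dom_perfect_common_match_calc a → Spec_perfect_common_match_calc a (perfect_common_match_calc a)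

-- ===== LEMMAS AND PROOFS =====

-- A's dict-building loop is Counter(a)
lemma pvA_counts_eq_counter (l : List Char) :
    l.foldl
      (fun (counts : PySem.Dict Char Int) character =>
        if counts.contains character then
          counts.insert character (counts.getD character 0 + 1)
        else
          counts.insert character 1)
      PySem.Dict.empty = PySem.Dict.counter l := by
  rw [← PySem.Dict.foldl_insert_getD_add_one_eq_counter]
  apply PySem.List.foldl_congr_mem
  intro d c hc
  by_cases h : d.contains c
  · simp [h]
  · simp only [h]
    rw [PySem.Dict.getD_of_not_contains (h := by simpa using h)]
    norm_num

-- B's run scan over a sorted list is the sum of squared multiplicities over the distinct elements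
lemma pvRunsSum_eq (s : List Char) (hs : s.Pairwise (· ≤ ·)) :
    pvRunsSum s
      = ((PySem.Set.ofList s).map (fun k => (s.count k : Int) * (s.count k : Int))).sum := by
  match s with
  | [] => simp [pvRunsSum, PySem.Set.ofList]
  | c :: t =>
    set u := t.takeWhile (fun x => x == c) with hu
    set r := t.dropWhile (fun x => x == c) with hr
    have ht : u ++ r = t := List.takeWhile_append_dropWhile ..
    have hall : ∀ x ∈ u, x = c := by
      intro x hx
      have := List.mem_takeWhile_imp (hu ▸ hx)
      simpa using this
    have hpt : t.Pairwise (· ≤ ·) := (List.pairwise_cons.mp hs).2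
    have hct : ∀ x ∈ t, c ≤ x := (List.pairwise_cons.mp hs).1
    have hpr : r.Pairwise (· ≤ ·) := hpt.sublist (hr ▸ List.dropWhile_sublist _)
    have hcr : c ∉ r := by
      intro hmem
      have hne : r ≠ [] := List.ne_nil_of_mem hmem
      obtain ⟨d, r', hdr⟩ := List.exists_cons_of_ne_nil hne
      have hdfail : (d == c) = false := by
        have h1 := List.head_dropWhile_not (fun x => x == c) (l := t) (by rw [← hr]; exact hne)
        have h2 : r.head hne = d := by simp [hdr]
        have h1' : (r.head hne == c) = false := h1
        rwa [h2] at h1'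
      have hdc : c < d := lt_of_le_of_ne
        (hct d ((List.dropWhile_sublist _ : r.Sublist t).mem (by show d ∈ r; rw [hdr]; simp)))
        (fun h => by simp [← h] at hdfail)
      rcases List.mem_cons.mp (hdr ▸ hmem) with h | h
      · exact absurd h.symm (ne_of_gt hdc)
      · have : d ≤ c := (List.pairwise_cons.mp (hdr ▸ hpr)).1 c h
        exact absurd hdc (not_lt.mpr this)
    have hcount_c : (c :: t).count c = 1 + u.length := by
      rw [← ht]
      simp [List.count_append, List.count_eq_zero.mpr hcr,
        List.count_eq_length.mpr (by intro x hx; simpa using (hall x hx).symm)]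
      omega
    have hcount_ne : ∀ k, k ≠ c → (c :: t).count k = r.count k := by
      intro k hk
      rw [← ht]
      simp [List.count_append, Ne.symm hk,
        List.count_eq_zero.mpr (fun hx => hk ((hall k hx)))]
    have hperm : (PySem.Set.ofList (c :: t)).Perm (c :: PySem.Set.ofList r) := by
      refine (List.perm_ext_iff_of_nodup (PySem.Set.nodup_ofList _) ?_).mpr ?_
      · exact List.nodup_cons.mpr
          ⟨fun h => hcr ((PySem.Set.mem_ofList _ _).mp h), PySem.Set.nodup_ofList _⟩
      · intro x
        simp only [PySem.Set.mem_ofList, List.mem_cons]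
        rw [← ht]
        simp only [List.mem_append]
        constructor
        · rintro (h | h | h)
          · exact Or.inl h
          · exact Or.inl (hall x h)
          · exact Or.inr h
        · rintro (h | h)
          · exact Or.inl h
          · exact Or.inr (Or.inr h)
    have hIH := pvRunsSum_eq r hpr
    rw [pvRunsSum]
    rw [(hperm.map _).sum_eq]
    simp only [List.map_cons, List.sum_cons]
    have hrest : ((PySem.Set.ofList r).map (fun k => ((c :: t).count k : Int) * ((c :: t).count k : Int))).sum
        = ((PySem.Set.ofList r).map (fun k => (r.count k : Int) * (r.count k : Int))).sum := by
      congr 1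
      apply List.map_congr_left
      intro k hk
      have hkc : k ≠ c := fun h => hcr (h ▸ ((PySem.Set.mem_ofList _ _).mp hk))
      rw [hcount_ne k hkc]
    rw [hrest, ← hIH, hcount_c]
    push_cast
    ring
termination_by s.length
decreasing_by simpa using Nat.lt_succ_of_le (List.length_dropWhile_le _ t)

-- ===== VERDICT (by name: the statement is the Claim_ definition above) =====
theorem perfect_common_match_calc_spec : Claim_equal_perfect_common_match_calc := by
  intro a _
  show perfect_common_match_calc a = perfect_common_match_calc_alt a
  unfold perfect_common_match_calc perfect_common_match_calc_alt
  rw [pvA_counts_eq_counter]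
  rw [PySem.List.foldl_add _ (fun c => c * c) 0]
  simp only [PySem.Dict.values, PySem.Dict.items_counter, List.map_map, Function.comp_def,
    zero_add]
  rw [pvRunsSum_eq _ (PySem.List.sorted_pairwise a.toList (fun x => x))]
  have hperm : (PySem.List.sorted a.toList (fun x => x) false).Perm a.toList :=
    PySem.List.sorted_perm a.toList _ _
  have hset : (PySem.Set.ofList (PySem.List.sorted a.toList (fun x => x) false)).Perm
      (PySem.Set.ofList a.toList) := by
    refine (List.perm_ext_iff_of_nodup (PySem.Set.nodup_ofList _) (PySem.Set.nodup_ofList _)).mpr ?_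
    intro x
    rw [PySem.Set.mem_ofList, PySem.Set.mem_ofList]
    exact hperm.mem_iff
  rw [(hset.map _).sum_eq]
  congr 1
  apply List.map_congr_left
  intro k _
  rw [hperm.count_eq]
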